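-- pv_equiv track=rewrite | github.com/luddite478/HypnoPitch | app/sample_scanner.py | _disambiguate_candidates
-- ===== SOURCE A (Python) =====
-- from typing import Any, Dict, Iterable, List, Optional, Set
--
-- def _normalize_path(path_value: str) -> str:
--     return path_value.replace("\\", "/")
--
-- def _entry_sha256(entry: Dict[str, Any]) -> Optional[str]:
--     value = entry.get("sha256")
--     if isinstance(value, str):
--         normalized = value.strip().lower()
--         if len(normalized) == 64:
--             return normalized
--     return None
--
-- def _entry_path(entry: Dict[str, Any]) -> Optional[str]:
--     value = entry.get("path")
--     if isinstance(value, str):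
--         normalized = _normalize_path(value.strip())
--         if normalized:
--             return normalized
--     return None
--
-- def _disambiguate_candidates(
--     candidates: List[str],
--     previous_samples: Dict[str, Dict[str, Any]],
--     relative_file_path: str,
--     file_hash: str,
-- ) -> Optional[str]:
--     """When multiple manifest entries share legacy_hash_12 or full sha256, match by path/hash."""
--     if len(candidates) == 1:
--         return candidates[0]
--
--     path_matches = [
--         cid
--         for cid in candidates
--         if _entry_path(previous_samples.get(cid, {})) == relative_file_path
--     ]
--     if len(path_matches) == 1:
--         return path_matches[0]
--
--     hash_and_path = [
--         cid
--         for cid in candidates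
--         if _entry_sha256(previous_samples.get(cid, {})) == file_hash
--         and _entry_path(previous_samples.get(cid, {})) == relative_file_path
--     ]
--     if len(hash_and_path) == 1:
--         return hash_and_path[0]
--
--     hash_only = [
--         cid
--         for cid in candidates
--         if _entry_sha256(previous_samples.get(cid, {})) == file_hash
--     ]
--     if len(hash_only) == 1:
--         return hash_only[0]
--
--     return None
-- ===== SOURCE B (Python) =====
-- from typing import Any, Dict, List, Optional
--
--
-- def _normalize_path(path_value: str) -> str:
--     return path_value.replace("\\", "/")
--
--
-- def _entry_sha256(entry: Dict[str, Any]) -> Optional[str]: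
--     value = entry.get("sha256")
--     if isinstance(value, str):
--         normalized = value.strip().lower()
--         if len(normalized) == 64:
--             return normalized
--     return None
--
--
-- def _entry_path(entry: Dict[str, Any]) -> Optional[str]:
--     value = entry.get("path")
--     if isinstance(value, str):
--         normalized = _normalize_path(value.strip())
--         if normalized:
--             return normalized
--     return None
--
--
-- def _disambiguate_candidates(
--     candidates: List[str],
--     previous_samples: Dict[str, Dict[str, Any]],
--     relative_file_path: str,
--     file_hash: str,
-- ) -> Optional[str]:
--     """Single pass: compute each entry's path/hash once, keep count + first id per bucket."""
--     if len(candidates) == 1: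
--         return candidates[0]
--
--     p_cnt = hp_cnt = h_cnt = 0
--     p_first = hp_first = h_first = None
--     for cid in candidates:
--         entry = previous_samples.get(cid, {})
--         path_ok = _entry_path(entry) == relative_file_path
--         hash_ok = _entry_sha256(entry) == file_hash
--         if path_ok:
--             p_cnt += 1
--             if p_first is None:
--                 p_first = cid
--         if hash_ok and path_ok:
--             hp_cnt += 1
--             if hp_first is None:
--                 hp_first = cid
--         if hash_ok:
--             h_cnt += 1
--             if h_first is None:
--                 h_first = cid
--
--     if p_cnt == 1:
--         return p_first
--     if hp_cnt == 1:
--         return hp_first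
--     if h_cnt == 1:
--         return h_first
--     return None
-- ===== Notes on version B (the rewrite author's own statement) =====
-- stated objective: faster
-- what changed: Replaces A's three separate list comprehensions (each rescanning candidates and recomputing the normalized path / sha256 helpers per bucket) with a single pass that computes each entry's path and hash once and maintains only a count and first-matching id per bucket, followed by a short decision phase.
import Mathlib
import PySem

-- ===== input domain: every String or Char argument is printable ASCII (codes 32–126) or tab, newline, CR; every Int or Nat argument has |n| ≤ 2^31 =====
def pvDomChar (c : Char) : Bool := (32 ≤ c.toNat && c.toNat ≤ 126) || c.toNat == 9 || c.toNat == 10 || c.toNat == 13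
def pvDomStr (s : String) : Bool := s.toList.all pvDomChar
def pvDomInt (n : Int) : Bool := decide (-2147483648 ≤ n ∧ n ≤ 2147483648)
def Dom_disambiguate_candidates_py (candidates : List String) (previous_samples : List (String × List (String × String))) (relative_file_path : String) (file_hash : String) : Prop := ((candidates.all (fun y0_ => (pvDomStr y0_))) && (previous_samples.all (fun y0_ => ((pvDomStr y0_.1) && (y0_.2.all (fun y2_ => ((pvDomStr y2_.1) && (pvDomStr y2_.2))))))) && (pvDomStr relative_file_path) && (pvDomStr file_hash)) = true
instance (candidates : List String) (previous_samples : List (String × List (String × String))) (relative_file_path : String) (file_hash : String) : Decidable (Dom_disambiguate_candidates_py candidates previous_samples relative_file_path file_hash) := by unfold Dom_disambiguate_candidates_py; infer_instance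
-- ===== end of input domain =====

-- B replaces A's three bucket-building list comprehensions (each a fresh scan recomputing the
-- path/sha256 helpers) by one pass that evaluates each entry's path and hash once and keeps only
-- a count and the first matching id per bucket (constant-factor speedup, O(1) extra space).

-- ===== PORT A =====
-- shared module helpers (_normalize_path, _entry_sha256, _entry_path), used by both Pythons
def pvNormalizePath (s : String) : String := PySem.Str.replace s "\\" "/"

def pvEntrySha256 (entry : PySem.Dict String String) : Option String :=
  match entry.get? "sha256" with
  | some v =>
      let normalized := PySem.Str.lower (PySem.Str.strip v)
      if PySem.Str.len normalized = 64 then some normalized else none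
  | none => none

def pvEntryPath (entry : PySem.Dict String String) : Option String :=
  match entry.get? "path" with
  | some v =>
      let normalized := pvNormalizePath (PySem.Str.strip v)
      if normalized ≠ "" then some normalized else none
  | none => none

-- previous_samples.get(cid, {})
def pvEntryOf (previous_samples : List (String × List (String × String))) (cid : String) : PySem.Dict String String :=
  PySem.Dict.mk ((PySem.Dict.mk previous_samples).getD cid [])

def disambiguate_candidates_py (candidates : List String) (previous_samples : List (String × List (String × String))) (relative_file_path : String) (file_hash : String) : Option String :=
  if candidates.length = 1 then candidates.head?
  else
    let path_matches := candidates.filter (fun cid =>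
      pvEntryPath (pvEntryOf previous_samples cid) == some relative_file_path)
    if path_matches.length = 1 then path_matches.head?
    else
      let hash_and_path := candidates.filter (fun cid =>
        (pvEntrySha256 (pvEntryOf previous_samples cid) == some file_hash)
          && (pvEntryPath (pvEntryOf previous_samples cid) == some relative_file_path))
      if hash_and_path.length = 1 then hash_and_path.head?
      else
        let hash_only := candidates.filter (fun cid =>
          pvEntrySha256 (pvEntryOf previous_samples cid) == some file_hash)
        if hash_only.length = 1 then hash_only.head?
        else none

-- ===== PORT B =====
-- `if first is None: first = cid`
def pvSetIfNone (o : Option String) (cid : String) : Option String :=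
  match o with
  | none => some cid
  | some v => some v

-- one candidate's update of the three (count, first-id) buckets
def pvBucketStep (previous_samples : List (String × List (String × String))) (relative_file_path : String) (file_hash : String)
    (s : (Nat × Option String) × (Nat × Option String) × (Nat × Option String)) (cid : String) :
    (Nat × Option String) × (Nat × Option String) × (Nat × Option String) :=
  let entry := pvEntryOf previous_samples cid
  let pathOk := pvEntryPath entry == some relative_file_path
  let hashOk := pvEntrySha256 entry == some file_hash
  let p := if pathOk then (s.1.1 + 1, pvSetIfNone s.1.2 cid) else s.1
  let hp := if hashOk && pathOk then (s.2.1.1 + 1, pvSetIfNone s.2.1.2 cid) else s.2.1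
  let h := if hashOk then (s.2.2.1 + 1, pvSetIfNone s.2.2.2 cid) else s.2.2
  (p, hp, h)

def disambiguate_candidates_py_alt (candidates : List String) (previous_samples : List (String × List (String × String))) (relative_file_path : String) (file_hash : String) : Option String :=
  if candidates.length = 1 then candidates.head?
  else
    let st := candidates.foldl (pvBucketStep previous_samples relative_file_path file_hash)
      ((0, none), (0, none), (0, none))
    if st.1.1 = 1 then st.1.2
    else if st.2.1.1 = 1 then st.2.1.2
    else if st.2.2.1 = 1 then st.2.2.2
    else none

-- ===== PRECONDITION & SPEC =====
def Spec_disambiguate_candidates_py (candidates : List String) (previous_samples : List (String × List (String × String))) (relative_file_path : String) (file_hash : String) (out : Option String) : Prop := out = disambiguate_candidates_py_alt candidates previous_samples relative_file_path file_hash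
instance (candidates : List String) (previous_samples : List (String × List (String × String))) (relative_file_path : String) (file_hash : String) (out : Option String) : Decidable (Spec_disambiguate_candidates_py candidates previous_samples relative_file_path file_hash out) := by unfold Spec_disambiguate_candidates_py; infer_instance

-- ===== CLAIM (what is proved, stated in full; the proofs are below) =====
def Claim_equal_disambiguate_candidates_py : Prop := ∀ (candidates : List String) (previous_samples : List (String × List (String × String))) (relative_file_path : String) (file_hash : String), Dom_disambiguate_candidates_py candidates previous_samples relative_file_path file_hash → Spec_disambiguate_candidates_py candidates previous_samples relative_file_path file_hash (disambiguate_candidates_py candidates previous_samples relative_file_path file_hash)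

-- ===== LEMMAS AND PROOFS =====

theorem pvSetIfNone_eq_or (o : Option String) (cid : String) :
    pvSetIfNone o cid = o.or (some cid) := by
  cases o <;> rfl

-- the fold computes, per bucket, the length and first element of A's corresponding filter
theorem pvBucketStep_foldl (previous_samples : List (String × List (String × String)))
    (relative_file_path : String) (file_hash : String) :
    ∀ (l : List String) (s : (Nat × Option String) × (Nat × Option String) × (Nat × Option String)),
    l.foldl (pvBucketStep previous_samples relative_file_path file_hash) s =
      ((s.1.1 + (l.filter (fun cid =>
          pvEntryPath (pvEntryOf previous_samples cid) == some relative_file_path)).length,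
        s.1.2.or (l.filter (fun cid =>
          pvEntryPath (pvEntryOf previous_samples cid) == some relative_file_path)).head?),
       (s.2.1.1 + (l.filter (fun cid =>
          (pvEntrySha256 (pvEntryOf previous_samples cid) == some file_hash)
            && (pvEntryPath (pvEntryOf previous_samples cid) == some relative_file_path))).length,
        s.2.1.2.or (l.filter (fun cid =>
          (pvEntrySha256 (pvEntryOf previous_samples cid) == some file_hash)
            && (pvEntryPath (pvEntryOf previous_samples cid) == some relative_file_path))).head?),
       (s.2.2.1 + (l.filter (fun cid =>
          pvEntrySha256 (pvEntryOf previous_samples cid) == some file_hash)).length,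
        s.2.2.2.or (l.filter (fun cid =>
          pvEntrySha256 (pvEntryOf previous_samples cid) == some file_hash)).head?)) := by
  intro l
  induction l with
  | nil => intro s; simp
  | cons cid rest ih =>
      intro s
      rw [List.foldl_cons, ih]
      simp only [pvBucketStep, pvSetIfNone_eq_or, List.filter_cons]
      by_cases hp : (pvEntryPath (pvEntryOf previous_samples cid) == some relative_file_path) = true <;>
        by_cases hh : (pvEntrySha256 (pvEntryOf previous_samples cid) == some file_hash) = true <;>
          simp [hp, hh, Nat.add_assoc, Nat.add_comm 1]

-- ===== VERDICT (by name: the statement is the Claim_ definition above) =====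
theorem disambiguate_candidates_py_spec : Claim_equal_disambiguate_candidates_py := by
  intro candidates previous_samples relative_file_path file_hash _
  unfold Spec_disambiguate_candidates_py disambiguate_candidates_py disambiguate_candidates_py_alt
  rw [pvBucketStep_foldl]
  simp
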